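-- pv_equiv track=rewrite | github.com/itsokayaish/ACC45DAYSOFCODE-2024 | Day 15- Pet Store.py | can_split_animals
-- ===== SOURCE A (Python) =====
-- def can_split_animals(animal_types):
--     """
--     Checks if the given animal types can be split into pairs.
--
--     Args:
--         animal_types (list): A list of animal types.
--
--     Returns:
--         str: "Yes" if the animals can be split into pairs, "No" otherwise.
--     """
--     freq = {}
--     for animal in animal_types:
--         freq[animal] = freq.get(animal, 0) + 1
--
--     for count in freq.values():
--         if count % 2 != 0:
--             return "No"
--     return "Yes"
-- ===== SOURCE B (Python) =====
-- def can_split_animals(animal_types):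
--     """One-pass parity toggle: keep the set of animals seen an odd number of times."""
--     odd = set()
--     for animal in animal_types:
--         if animal in odd:
--             odd.discard(animal)
--         else:
--             odd.add(animal)
--     return "Yes" if not odd else "No"
-- ===== Notes on version B (the rewrite author's own statement) =====
-- stated objective: idiomatic
-- what changed: Replaces the frequency dict plus a second pass over its values with a single pass maintaining a set of odd-parity animals, returning Yes iff the set ends empty.
import Mathlib
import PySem

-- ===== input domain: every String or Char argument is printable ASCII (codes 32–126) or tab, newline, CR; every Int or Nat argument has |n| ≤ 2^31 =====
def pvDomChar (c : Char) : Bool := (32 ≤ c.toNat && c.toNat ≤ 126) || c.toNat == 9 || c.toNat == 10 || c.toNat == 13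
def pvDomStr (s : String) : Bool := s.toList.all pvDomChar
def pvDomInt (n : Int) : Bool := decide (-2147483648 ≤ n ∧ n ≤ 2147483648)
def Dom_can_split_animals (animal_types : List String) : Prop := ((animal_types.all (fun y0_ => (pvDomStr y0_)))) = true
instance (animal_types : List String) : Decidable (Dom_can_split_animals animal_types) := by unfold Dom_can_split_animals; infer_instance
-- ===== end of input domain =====

-- B replaces A's frequency dict + second pass over its values by a single pass
-- maintaining the set of odd-parity animals (idiomatic; same O(n) cost).

-- ===== PORT A =====
-- the 'for count in freq.values(): if count % 2 != 0: return "No"' loop with its early return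
def pvCheckVals : List Int → String
  | [] => "Yes"
  | c :: rest => if PySem.Int.mod c 2 ≠ 0 then "No" else pvCheckVals rest

def can_split_animals (animal_types : List String) : String :=
  let freq := animal_types.foldl (fun d animal => d.insert animal (d.getD animal 0 + 1)) PySem.Dict.empty
  pvCheckVals freq.values

-- ===== PORT B =====
def can_split_animals_alt (animal_types : List String) : String :=
  let odd := animal_types.foldl
    (fun s animal => if PySem.Set.contains s animal then PySem.Set.discard s animal else PySem.Set.add s animal)
    PySem.Set.empty
  if odd.isEmpty then "Yes" else "No"

-- ===== PRECONDITION & SPEC =====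
def Spec_can_split_animals (animal_types : List String) (out : String) : Prop := out = can_split_animals_alt animal_types
instance (animal_types : List String) (out : String) : Decidable (Spec_can_split_animals animal_types out) := by unfold Spec_can_split_animals; infer_instance

-- ===== CLAIM (what is proved, stated in full; the proofs are below) =====
def Claim_equal_can_split_animals : Prop := ∀ (animal_types : List String), Dom_can_split_animals animal_types → Spec_can_split_animals animal_types (can_split_animals animal_types)

-- ===== LEMMAS AND PROOFS =====

-- A's value loop returns "Yes" exactly when every count is even, else "No"
theorem pvCheckVals_char (l : List Int) :
    pvCheckVals l = if ∀ c ∈ l, (2:Int) ∣ c then "Yes" else "No" := by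
  induction l with
  | nil => simp [pvCheckVals]
  | cons c rest ih =>
    by_cases h : (2:Int) ∣ c
    · have h0 : c % 2 = 0 := Int.emod_eq_zero_of_dvd h
      simp [pvCheckVals, h, h0, ih]
    · have h1 : c % 2 = 1 := by omega
      simp [pvCheckVals, h, h1]

-- B's parity-toggle loop: membership in the running set XOR-tracks the parity of the count
theorem pvToggle_mem (xs : List String) (s : List String) (a : String) :
    (a ∈ xs.foldl
      (fun s animal => if PySem.Set.contains s animal then PySem.Set.discard s animal else PySem.Set.add s animal)
      s) ↔ ((a ∈ s) ↔ Even (xs.count a)) := by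
  induction xs generalizing s with
  | nil => simp
  | cons x xs ih =>
    simp only [List.foldl_cons, ih]
    rcases eq_or_ne a x with rfl | hax
    · by_cases hx : a ∈ s
      · simp [hx, PySem.Set.mem_discard, Nat.even_add_one]
      · simp [hx, Nat.even_add_one]
    · have hax' : x ≠ a := hax.symm
      by_cases hx : x ∈ s <;>
        simp [hx, hax, hax', PySem.Set.mem_discard]

-- the final set is empty iff every animal occurring in the list has an even count
theorem pvToggle_empty_iff (xs : List String) :
    (xs.foldl
      (fun s animal => if PySem.Set.contains s animal then PySem.Set.discard s animal else PySem.Set.add s animal)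
      PySem.Set.empty) = [] ↔ ∀ a ∈ xs, Even (xs.count a) := by
  constructor
  · intro h a ha
    have hm := (pvToggle_mem xs PySem.Set.empty a).not
    rw [h] at hm
    simp [PySem.Set.empty] at hm
    exact hm
  · intro h
    by_contra hne
    obtain ⟨a, ha⟩ := List.exists_mem_of_ne_nil _ hne
    have hodd := (pvToggle_mem xs PySem.Set.empty a).mp ha
    simp [PySem.Set.empty] at hodd
    rw [Nat.odd_iff] at hodd
    have hmem : a ∈ xs := List.count_pos_iff.mp (by omega)
    have hev := h a hmem
    rw [Nat.even_iff] at hev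
    omega

-- ===== VERDICT (by name: the statement is the Claim_ definition above) =====
theorem can_split_animals_spec : Claim_equal_can_split_animals := by
  intro xs _
  show can_split_animals xs = can_split_animals_alt xs
  simp only [can_split_animals, can_split_animals_alt,
    PySem.Dict.foldl_insert_getD_add_one_eq_counter]
  rw [PySem.Dict.values_eq_map_keys _ (PySem.Dict.nodup_keys_counter xs) 0,
    PySem.Dict.keys_counter, pvCheckVals_char]
  have hiff : (∀ c ∈ (PySem.Set.ofList xs).map (fun k => (PySem.Dict.counter xs).getD k 0),
      (2:Int) ∣ c) ↔ ∀ a ∈ xs, Even (xs.count a) := by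
    constructor
    · intro hall a ha
      have h2 := hall ((xs.count a : Int))
        (List.mem_map.mpr ⟨a, (PySem.Set.mem_ofList xs a).mpr ha, PySem.Dict.getD_counter xs a⟩)
      rw [Nat.even_iff]
      omega
    · intro hP c hc
      obtain ⟨k, hk, rfl⟩ := List.mem_map.mp hc
      rw [PySem.Dict.getD_counter]
      have hk2 := hP k ((PySem.Set.mem_ofList xs k).mp hk)
      rw [Nat.even_iff] at hk2
      omega
  by_cases hP : ∀ a ∈ xs, Even (xs.count a)
  · rw [if_pos (hiff.mpr hP), (pvToggle_empty_iff xs).mpr hP]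
    simp
  · rw [if_neg (fun h => hP (hiff.mp h)),
      if_neg (fun hemp => hP ((pvToggle_empty_iff xs).mp (List.isEmpty_iff.mp hemp)))]
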